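-- pv_equiv track=rewrite | github.com/bintoo/AlphaFactory | generated_algos/Gen1_5889290b_20251216_234941.py | _GetQuasiDiag
-- ===== SOURCE A (Python) =====
-- def _GetQuasiDiag(linkage, n):
--     # Quasi-diagonalisation: recursively traverse the linkage to get leaf order.
--     # This is the dendrogram-derived leaf ordering used by HRP.
--     if n <= 1:
--         return list(range(n))
--
--     # Build children map for non-leaf cluster ids
--     children = {}
--     for k, row in enumerate(linkage):
--         a = int(row[0])
--         b = int(row[1])
--         cluster_id = n + k
--         children[cluster_id] = (a, b)
--
--     root = n + len(linkage) - 1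
--
--     def expand(node):
--         if node < n:
--             return [node]
--         left, right = children[node]
--         return expand(left) + expand(right)
--
--     return expand(root)
-- ===== SOURCE B (Python) =====
-- def _GetQuasiDiag(linkage, n):
--     # Iterative preorder traversal with an explicit stack; leaves are appended
--     # to a single output list instead of concatenating sublists recursively.
--     if n <= 1:
--         return list(range(n))
--     order = []
--     stack = [n + len(linkage) - 1]
--     while stack:
--         node = stack.pop()
--         if node < n:
--             order.append(node)
--         else:
--             row = linkage[node - n]
--             stack.append(int(row[1]))
--             stack.append(int(row[0]))
--     return order
-- ===== Notes on version B (the rewrite author's own statement) =====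
-- stated objective: alternative
-- what changed: Replaces the recursive expand (children dict + list concatenation at every internal node) by an iterative preorder traversal with an explicit stack that indexes the linkage rows directly and appends each leaf once to a single output list; Pre_ additionally excludes non-standard linkages whose rows reference later cluster ids (A can still return there and B agrees, but every real linkage references strictly earlier ids and termination is proved from that invariant).
-- outside the precondition, e.g. on _GetQuasiDiag([[3, 3], [0, 1]], 2): A returns [0, 1], B returns [0, 1]
import Mathlib
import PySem

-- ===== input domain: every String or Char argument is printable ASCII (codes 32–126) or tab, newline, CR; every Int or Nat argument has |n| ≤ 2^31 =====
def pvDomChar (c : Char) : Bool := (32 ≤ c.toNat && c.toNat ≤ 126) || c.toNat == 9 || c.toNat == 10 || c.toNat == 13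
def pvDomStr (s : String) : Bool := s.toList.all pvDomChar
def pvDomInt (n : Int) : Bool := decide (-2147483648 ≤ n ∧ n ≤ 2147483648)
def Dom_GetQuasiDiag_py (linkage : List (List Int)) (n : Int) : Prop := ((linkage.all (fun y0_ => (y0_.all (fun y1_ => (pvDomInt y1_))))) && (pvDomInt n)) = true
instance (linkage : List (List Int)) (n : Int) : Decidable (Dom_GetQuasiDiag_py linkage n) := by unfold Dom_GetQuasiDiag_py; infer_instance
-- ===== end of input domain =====

-- B replaces A's recursive expand (children dict, list concatenation) by an iterative
-- stack-based preorder traversal that indexes linkage rows directly and appends leaves to one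
-- list (alternative decomposition; return values proved equal on Pre_).

-- ===== PORT A =====
-- children map: for k, row in enumerate(linkage): children[n+k] = (int(row[0]), int(row[1]))
-- row[0]/row[1] would raise IndexError on a short row (excluded by Pre_); ported as pyGetD _ _ 0.
def pvChildrenA (linkage : List (List Int)) (n : Int) : PySem.Dict Int (Int × Int) :=
  (PySem.List.enumerate linkage).foldl
    (fun d p => d.insert (n + p.1) (PySem.List.pyGetD p.2 0 0, PySem.List.pyGetD p.2 1 0))
    PySem.Dict.empty

-- def expand(node): leaf → [node]; else children[node] (KeyError on a dangling id, excluded by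
-- Pre_, ported as []) and concatenate. Fuel makes the recursion total; linkage.length + 1
-- suffices on Pre_ (cluster ids strictly decrease along any path).
def pvExpandA (children : PySem.Dict Int (Int × Int)) (n : Int) : Nat → Int → List Int
  | 0, _ => []
  | f + 1, node =>
    if node < n then [node]
    else
      match children.get? node with
      | some (a, b) => pvExpandA children n f a ++ pvExpandA children n f b
      | none => []

def GetQuasiDiag_py (linkage : List (List Int)) (n : Int) : List Int :=
  if n ≤ 1 then PySem.List.pyRange 0 n 1
  else pvExpandA (pvChildrenA linkage n) n (linkage.length + 1)
         (n + (linkage.length : Int) - 1)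

-- ===== PORT B =====
-- while stack: node = stack.pop(); leaf → order.append(node); else push row[1] then row[0].
-- Fuel makes the loop total; 2^(linkage.length+2) bounds the number of iterations on Pre_.
def pvLoopB (linkage : List (List Int)) (n : Int) : Nat → List Int → List Int → List Int
  | 0, order, _ => order
  | _ + 1, order, [] => order
  | f + 1, order, node :: stack =>
    if node < n then pvLoopB linkage n f (order ++ [node]) stack
    else
      let row := (PySem.List.pyGet? linkage (node - n)).getD []
      pvLoopB linkage n f order
        (PySem.List.pyGetD row 0 0 :: PySem.List.pyGetD row 1 0 :: stack)

def GetQuasiDiag_py_alt (linkage : List (List Int)) (n : Int) : List Int :=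
  if n ≤ 1 then PySem.List.pyRange 0 n 1
  else pvLoopB linkage n (2 ^ (linkage.length + 2)) []
         [n + (linkage.length : Int) - 1]

-- ===== PRECONDITION & SPEC =====
-- Pre_ excludes the inputs on which A raises (rows shorter than 2 → IndexError, dangling
-- cluster ids → KeyError, cyclic references → RecursionError) by requiring the standard
-- linkage invariant: each row references ids strictly below its own cluster id n+k. This is
-- slightly narrower than "A returns": on a non-standard linkage whose rows acyclically
-- reference LATER clusters A still returns (and B agrees there — see the cite in the claim),
-- but the invariant is what every real linkage satisfies and what termination is proved from.
def Pre_GetQuasiDiag_py (linkage : List (List Int)) (n : Int) : Prop :=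
  n ≤ 1 ∨ ∀ k : Nat, (hk : k < linkage.length) →
    2 ≤ linkage[k].length ∧
    PySem.List.pyGetD linkage[k] 0 0 < n + (k : Int) ∧
    PySem.List.pyGetD linkage[k] 1 0 < n + (k : Int)
instance (linkage : List (List Int)) (n : Int) : Decidable (Pre_GetQuasiDiag_py linkage n) := by
  unfold Pre_GetQuasiDiag_py; infer_instance

def pvWitness_GetQuasiDiag_py : List (List Int) × Int := ([[0, 1], [2, 4]], 4)

def Spec_GetQuasiDiag_py (linkage : List (List Int)) (n : Int) (out : List Int) : Prop :=
  out = GetQuasiDiag_py_alt linkage n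
instance (linkage : List (List Int)) (n : Int) (out : List Int) : Decidable (Spec_GetQuasiDiag_py linkage n out) := by
  unfold Spec_GetQuasiDiag_py; infer_instance

-- ===== CLAIM (what is proved, stated in full; the proofs are below) =====
def Claim_equal_GetQuasiDiag_py : Prop := ∀ (linkage : List (List Int)) (n : Int), Dom_GetQuasiDiag_py linkage n → Pre_GetQuasiDiag_py linkage n → Spec_GetQuasiDiag_py linkage n (GetQuasiDiag_py linkage n)

-- ===== LEMMAS AND PROOFS =====

-- a valid dendrogram node: a leaf or one of the clusters n+k, k < m
def pvGood (n : Int) (m : Nat) (node : Int) : Prop :=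
  node < n ∨ ∃ k : Nat, k < m ∧ node = n + (k : Int)

-- fuel rank: leaves need fuel 1, cluster n+k needs fuel k+2
def pvRank (n : Int) (node : Int) : Nat :=
  if node < n then 0 else (node - n).toNat + 1

-- canonical expansion of a node (A's expand with just enough fuel)
def pvE (linkage : List (List Int)) (n : Int) (node : Int) : List Int :=
  pvExpandA (pvChildrenA linkage n) n (pvRank n node + 1) node

lemma pvChildrenA_get? (linkage : List (List Int)) (n : Int) (k : Nat) (hk : k < linkage.length) :
    (pvChildrenA linkage n).get? (n + (k : Int)) =
      some (PySem.List.pyGetD linkage[k] 0 0, PySem.List.pyGetD linkage[k] 1 0) := by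
  have hnodup : (((PySem.List.enumerate linkage).map (fun p => n + p.1))).Nodup := by
    have h1 := PySem.List.map_fst_enumerate linkage 0
    have h2 : ((PySem.List.enumerate linkage).map (fun p => n + p.1)) =
        (PySem.List.pyRange 0 (0 + linkage.length) 1).map (fun x => n + x) := by
      rw [← h1, List.map_map]; rfl
    rw [h2]
    exact (PySem.List.nodup_pyRange_one 0 _).map (fun a b h => by omega)
  have hitems := PySem.Dict.items_foldl_insert_fresh
      (l := PySem.List.enumerate linkage)
      (k := fun p => n + p.1)
      (v := fun p => (PySem.List.pyGetD p.2 0 0, PySem.List.pyGetD p.2 1 0))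
      (d := PySem.Dict.empty)
      (by intro a _; simp [PySem.Dict.contains_empty]) hnodup
  have hkeysnodup : (pvChildrenA linkage n).keys.Nodup :=
    PySem.Dict.nodup_keys_foldl_insert_key _ _ _ _ (by simp [PySem.Dict.keys_empty])
  beta_reduce at hitems
  refine PySem.Dict.get?_of_mem_items _ ?_ hkeysnodup
  show _ ∈ (pvChildrenA linkage n).items
  unfold pvChildrenA
  rw [hitems]
  refine List.mem_append.2 (Or.inr ?_)
  refine List.mem_map.2 ⟨((k : Int), linkage[k]), ?_, rfl⟩
  exact (PySem.List.mem_enumerate_iff _ _ _).2 ⟨k, hk, by simp⟩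

lemma pvGood_child (linkage : List (List Int)) (n : Int) (k : Nat) (a : Int)
    (ha : a < n + (k : Int)) (hk : k < linkage.length) :
    pvGood n linkage.length a ∧ pvRank n a ≤ k := by
  by_cases h : a < n
  · exact ⟨Or.inl h, by simp [pvRank, h]⟩
  · have hj : a = n + ((a - n).toNat : Int) := by omega
    refine ⟨Or.inr ⟨(a - n).toNat, by omega, hj⟩, ?_⟩
    simp only [pvRank, if_neg h]
    omega

lemma pvExpand_stable (linkage : List (List Int)) (n : Int)
    (hpre : ∀ k : Nat, (hk : k < linkage.length) →
      2 ≤ linkage[k].length ∧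
      PySem.List.pyGetD linkage[k] 0 0 < n + (k : Int) ∧
      PySem.List.pyGetD linkage[k] 1 0 < n + (k : Int)) :
    ∀ (r : Nat) (node : Int), pvGood n linkage.length node → pvRank n node ≤ r →
      ∀ f, pvRank n node + 1 ≤ f →
      pvExpandA (pvChildrenA linkage n) n f node = pvE linkage n node := by
  intro r
  induction r with
  | zero =>
    intro node hg hr f hf
    have hlt : node < n := by
      by_contra h
      simp [pvRank, h] at hr
    obtain ⟨f', rfl⟩ : ∃ f', f = f' + 1 := ⟨f - 1, by omega⟩
    unfold pvE
    rw [show pvRank n node = 0 from by simp [pvRank, hlt]]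
    simp [pvExpandA, hlt]
  | succ r ih =>
    intro node hg hr f hf
    by_cases hlt : node < n
    · obtain ⟨f', rfl⟩ : ∃ f', f = f' + 1 := ⟨f - 1, by omega⟩
      unfold pvE
      rw [show pvRank n node = 0 from by simp [pvRank, hlt]]
      simp [pvExpandA, hlt]
    · obtain ⟨k, hk, rfl⟩ := hg.resolve_left hlt
      have hrank : pvRank n (n + (k : Int)) = k + 1 := by
        simp only [pvRank, if_neg hlt]
        omega
      obtain ⟨hlen, ha, hb⟩ := hpre k hk
      have hga := pvGood_child linkage n k _ ha hk
      have hgb := pvGood_child linkage n k _ hb hk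
      have hkr : k ≤ r := by omega
      obtain ⟨f', rfl⟩ : ∃ f', f = f' + 1 := ⟨f - 1, by omega⟩
      have hf' : k + 1 ≤ f' := by omega
      have step : ∀ g, pvExpandA (pvChildrenA linkage n) n (g + 1) (n + (k : Int)) =
          pvExpandA (pvChildrenA linkage n) n g (PySem.List.pyGetD linkage[k] 0 0) ++
          pvExpandA (pvChildrenA linkage n) n g (PySem.List.pyGetD linkage[k] 1 0) := by
        intro g
        simp [pvExpandA, hlt, pvChildrenA_get? linkage n k hk]
      unfold pvE
      rw [hrank, step, step]
      rw [ih _ hga.1 (le_trans hga.2 hkr) f' (by omega),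
          ih _ hgb.1 (le_trans hgb.2 hkr) f' (by omega),
          ih _ hga.1 (le_trans hga.2 hkr) (k + 1) (by omega),
          ih _ hgb.1 (le_trans hgb.2 hkr) (k + 1) (by omega)]

lemma pvE_leaf (linkage : List (List Int)) (n : Int) (node : Int) (hlt : node < n) :
    pvE linkage n node = [node] := by
  unfold pvE
  rw [show pvRank n node = 0 from by simp [pvRank, hlt]]
  simp [pvExpandA, hlt]

lemma pvE_cluster (linkage : List (List Int)) (n : Int)
    (hpre : ∀ k : Nat, (hk : k < linkage.length) →
      2 ≤ linkage[k].length ∧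
      PySem.List.pyGetD linkage[k] 0 0 < n + (k : Int) ∧
      PySem.List.pyGetD linkage[k] 1 0 < n + (k : Int))
    (k : Nat) (hk : k < linkage.length) (hlt : ¬ n + (k : Int) < n) :
    pvE linkage n (n + (k : Int)) =
      pvE linkage n (PySem.List.pyGetD linkage[k] 0 0) ++
      pvE linkage n (PySem.List.pyGetD linkage[k] 1 0) := by
  obtain ⟨hlen, ha, hb⟩ := hpre k hk
  have hga := pvGood_child linkage n k _ ha hk
  have hgb := pvGood_child linkage n k _ hb hk
  have hrank : pvRank n (n + (k : Int)) = k + 1 := by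
    simp only [pvRank, if_neg hlt]
    omega
  unfold pvE
  rw [hrank]
  have step : pvExpandA (pvChildrenA linkage n) n (k + 1 + 1) (n + (k : Int)) =
      pvExpandA (pvChildrenA linkage n) n (k + 1) (PySem.List.pyGetD linkage[k] 0 0) ++
      pvExpandA (pvChildrenA linkage n) n (k + 1) (PySem.List.pyGetD linkage[k] 1 0) := by
    simp [pvExpandA, hlt, pvChildrenA_get? linkage n k hk]
  rw [step,
      pvExpand_stable linkage n hpre k _ hga.1 hga.2 (k + 1) (by omega),
      pvExpand_stable linkage n hpre k _ hgb.1 hgb.2 (k + 1) (by omega)]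
  rfl

-- 1 ≤ length, and length ≤ 2 ^ rank
lemma pvE_len (linkage : List (List Int)) (n : Int)
    (hpre : ∀ k : Nat, (hk : k < linkage.length) →
      2 ≤ linkage[k].length ∧
      PySem.List.pyGetD linkage[k] 0 0 < n + (k : Int) ∧
      PySem.List.pyGetD linkage[k] 1 0 < n + (k : Int)) :
    ∀ (r : Nat) (node : Int), pvGood n linkage.length node → pvRank n node ≤ r →
      1 ≤ (pvE linkage n node).length ∧
      (pvE linkage n node).length ≤ 2 ^ pvRank n node := by
  intro r
  induction r with
  | zero =>
    intro node hg hr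
    have hlt : node < n := by
      by_contra h
      simp [pvRank, h] at hr
    rw [pvE_leaf linkage n node hlt]
    exact ⟨by simp, Nat.one_le_two_pow⟩
  | succ r ih =>
    intro node hg hr
    by_cases hlt : node < n
    · rw [pvE_leaf linkage n node hlt]
      exact ⟨by simp, Nat.one_le_two_pow⟩
    · obtain ⟨k, hk, rfl⟩ := hg.resolve_left hlt
      have hrank : pvRank n (n + (k : Int)) = k + 1 := by
        simp only [pvRank, if_neg hlt]
        omega
      obtain ⟨hlen, ha, hb⟩ := hpre k hk
      have hga := pvGood_child linkage n k _ ha hk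
      have hgb := pvGood_child linkage n k _ hb hk
      have hkr : k ≤ r := by omega
      have iha := ih _ hga.1 (le_trans hga.2 hkr)
      have ihb := ih _ hgb.1 (le_trans hgb.2 hkr)
      rw [pvE_cluster linkage n hpre k hk hlt, hrank]
      have hpa : (2 : Nat) ^ pvRank n (PySem.List.pyGetD linkage[k] 0 0) ≤ 2 ^ k :=
        Nat.pow_le_pow_right (by omega) hga.2
      have hpb : (2 : Nat) ^ pvRank n (PySem.List.pyGetD linkage[k] 1 0) ≤ 2 ^ k :=
        Nat.pow_le_pow_right (by omega) hgb.2
      simp only [List.length_append]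
      constructor
      · omega
      · have : (2 : Nat) ^ (k + 1) = 2 ^ k + 2 ^ k := by ring
        omega

-- the iterative loop with enough fuel drains the stack into the concatenated expansions
lemma pvLoopB_run (linkage : List (List Int)) (n : Int)
    (hpre : ∀ k : Nat, (hk : k < linkage.length) →
      2 ≤ linkage[k].length ∧
      PySem.List.pyGetD linkage[k] 0 0 < n + (k : Int) ∧
      PySem.List.pyGetD linkage[k] 1 0 < n + (k : Int)) :
    ∀ (f : Nat) (stack order : List Int),
      (∀ x ∈ stack, pvGood n linkage.length x) →
      (stack.map (fun x => 2 * (pvE linkage n x).length - 1)).sum ≤ f →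
      pvLoopB linkage n f order stack = order ++ stack.flatMap (pvE linkage n) := by
  intro f
  induction f with
  | zero =>
    intro stack order hg hsum
    match stack with
    | [] => simp [pvLoopB]
    | node :: rest =>
      exfalso
      have h1 := (pvE_len linkage n hpre (pvRank n node) node (hg node (by simp)) le_rfl).1
      simp only [List.map_cons, List.sum_cons] at hsum
      omega
  | succ f ih =>
    intro stack order hg hsum
    match stack with
    | [] => simp [pvLoopB]
    | node :: rest =>
      by_cases hlt : node < n
      · have : pvLoopB linkage n (f + 1) order (node :: rest) =
            pvLoopB linkage n f (order ++ [node]) rest := by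
          simp [pvLoopB, hlt]
        rw [this, ih rest (order ++ [node]) (fun x hx => hg x (by simp [hx])) ?hsum]
        · simp [pvE_leaf linkage n node hlt]
        case hsum =>
          simp only [List.map_cons, List.sum_cons, pvE_leaf linkage n node hlt,
            List.length_singleton] at hsum
          omega
      · obtain ⟨k, hk, rfl⟩ := (hg _ (by simp)).resolve_left hlt
        have hrow : (PySem.List.pyGet? linkage (n + (k : Int) - n)).getD [] = linkage[k] := by
          rw [show n + (k : Int) - n = (k : Int) by omega]
          simp [hk]
        have hstep : pvLoopB linkage n (f + 1) order ((n + (k : Int)) :: rest) =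
            pvLoopB linkage n f order
              (PySem.List.pyGetD linkage[k] 0 0 :: PySem.List.pyGetD linkage[k] 1 0 :: rest) := by
          simp only [pvLoopB, if_neg hlt, hrow]
        obtain ⟨hlen, ha, hb⟩ := hpre k hk
        have hga := pvGood_child linkage n k _ ha hk
        have hgb := pvGood_child linkage n k _ hb hk
        have hla := (pvE_len linkage n hpre _ _ hga.1 le_rfl).1
        have hlb := (pvE_len linkage n hpre _ _ hgb.1 le_rfl).1
        have hsplit := pvE_cluster linkage n hpre k hk hlt
        rw [hstep, ih _ order ?hg2 ?hsum2]
        · simp only [List.flatMap_cons, hsplit, List.append_assoc]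
        case hg2 =>
          intro x hx
          rcases List.mem_cons.1 hx with rfl | hx
          · exact hga.1
          rcases List.mem_cons.1 hx with rfl | hx
          · exact hgb.1
          · exact hg x (List.mem_cons_of_mem _ hx)
        case hsum2 =>
          simp only [List.map_cons, List.sum_cons] at hsum ⊢
          have : (pvE linkage n (n + (k : Int))).length =
              (pvE linkage n (PySem.List.pyGetD linkage[k] 0 0)).length +
              (pvE linkage n (PySem.List.pyGetD linkage[k] 1 0)).length := by
            rw [hsplit]; simp
          omega

-- ===== VERDICT (by name: the statement is the Claim_ definition above) =====
theorem GetQuasiDiag_py_spec : Claim_equal_GetQuasiDiag_py := by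
  intro linkage n _ hpre
  unfold Spec_GetQuasiDiag_py GetQuasiDiag_py GetQuasiDiag_py_alt
  by_cases hn : n ≤ 1
  · simp [hn]
  · rcases hpre with hpre | hpre
    · exact absurd hpre hn
    rw [if_neg hn, if_neg hn]
    set root := n + (linkage.length : Int) - 1 with hroot
    have hgood : pvGood n linkage.length root := by
      rcases Nat.eq_zero_or_pos linkage.length with h0 | hpos
      · left; rw [hroot, h0]; omega
      · right
        exact ⟨linkage.length - 1, by omega, by rw [hroot]; push_cast [Nat.cast_sub hpos]; omega⟩
    have hrank : pvRank n root ≤ linkage.length := by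
      rcases hgood with h | ⟨k, hk, hkeq⟩
      · simp [pvRank, h]
      · rw [hkeq]
        have : ¬ n + (k : Int) < n := by omega
        simp only [pvRank, if_neg this]
        omega
    have hA : pvExpandA (pvChildrenA linkage n) n (linkage.length + 1) root =
        pvE linkage n root :=
      pvExpand_stable linkage n hpre (pvRank n root) root hgood le_rfl _ (by omega)
    have hlenb := (pvE_len linkage n hpre (pvRank n root) root hgood le_rfl).2
    have hfuel : 2 * (pvE linkage n root).length - 1 ≤ 2 ^ (linkage.length + 2) := by
      have h1 : (2 : Nat) ^ pvRank n root ≤ 2 ^ linkage.length :=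
        Nat.pow_le_pow_right (by omega) hrank
      have h2 : (2 : Nat) ^ (linkage.length + 2) = 2 ^ linkage.length * 4 := by ring
      omega
    have hB := pvLoopB_run linkage n hpre (2 ^ (linkage.length + 2)) [root] []
        (by intro x hx; simp at hx; exact hx ▸ hgood)
        (by simpa using hfuel)
    rw [hA, hB]
    simp
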